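-- pv_equiv track=rewrite | github.com/auprao/agatha-game | src/agatha.py | read_cost
-- ===== SOURCE A (Python) =====
-- def read_cost(cost):
--     symbols = ""
--     cost = sorted(cost)
--     for i in range(len(cost)) :
--         current = cost[i]
--         match current :
--                 case "s" :
--                     symbols += "☆ "
--                 case "t" :
--                     symbols += "࿐ "
--                 case "c" :
--                     symbols += "○ "
--                 case "m" :
--                     symbols += "☾ "
--                 case "n" :
--                     symbols += "⚶ "
--                 case "h" :
--                     symbols += "♡ "
--     return symbols
-- ===== SOURCE B (Python) =====
-- def read_cost(cost):
--     # Count each cost character once, then emit symbols in the fixed sorted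
--     # key order c < h < m < n < s < t -- no sorting needed, O(n).
--     table = (("c", "\u25cb "), ("h", "\u2661 "), ("m", "\u263e "),
--              ("n", "\u26b6 "), ("s", "\u2606 "), ("t", "\u0fd0 "))
--     return "".join(sym * cost.count(ch) for ch, sym in table)
-- ===== Notes on version B (the rewrite author's own statement) =====
-- stated objective: faster
-- what changed: B drops the sort entirely: it counts each of the six cost characters once and emits each symbol repeated its count, in the fixed sorted key order c<h<m<n<s<t.
import Mathlib
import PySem

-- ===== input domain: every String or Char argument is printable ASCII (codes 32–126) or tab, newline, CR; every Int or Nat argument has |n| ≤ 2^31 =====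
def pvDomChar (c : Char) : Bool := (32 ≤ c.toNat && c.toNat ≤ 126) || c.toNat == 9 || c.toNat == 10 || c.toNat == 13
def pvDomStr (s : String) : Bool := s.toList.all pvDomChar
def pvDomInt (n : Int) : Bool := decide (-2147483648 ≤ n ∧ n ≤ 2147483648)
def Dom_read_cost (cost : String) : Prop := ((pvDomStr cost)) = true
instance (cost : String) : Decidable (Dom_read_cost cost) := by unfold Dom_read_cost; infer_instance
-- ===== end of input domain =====

-- B replaces A's sort-then-scan by a single counting pass emitting symbols in the fixed key order (faster: O(n) vs O(n log n)).


-- ===== PORT A =====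
-- the match statement of A, in A's branch order ('s','t','c','m','n','h', default nothing)
def readCostSym (c : Char) : List Char :=
  if c = 's' then "☆ ".toList
  else if c = 't' then "࿐ ".toList
  else if c = 'c' then "○ ".toList
  else if c = 'm' then "☾ ".toList
  else if c = 'n' then "⚶ ".toList
  else if c = 'h' then "♡ ".toList
  else []

def read_cost (cost : String) : String :=
  -- cost = sorted(cost): a list of the characters in sorted order
  let sortedCost := PySem.List.sorted cost.toList (fun c => c) false
  -- for i in range(len(cost)): symbols += <match cost[i]>
  String.ofList ((PySem.List.pyRange 0 (PySem.List.len sortedCost) 1).foldl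
    (fun acc i => acc ++ readCostSym (PySem.List.pyGetD sortedCost i ' ')) [])

-- ===== PORT B =====
def readCostTable : List (Char × String) :=
  [('c', "○ "), ('h', "♡ "), ('m', "☾ "), ('n', "⚶ "), ('s', "☆ "), ('t', "࿐ ")]

def read_cost_alt (cost : String) : String :=
  -- "".join(sym * cost.count(ch) for ch, sym in table)
  String.ofList (PySem.Chars.join []
    (readCostTable.map (fun p =>
      PySem.List.pyRepeat p.2.toList (PySem.Chars.count cost.toList [p.1]))))

-- ===== PRECONDITION & SPEC =====
def Spec_read_cost (cost : String) (out : String) : Prop := out = read_cost_alt cost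
instance (cost : String) (out : String) : Decidable (Spec_read_cost cost out) := by unfold Spec_read_cost; infer_instance

-- ===== CLAIM (what is proved, stated in full; the proofs are below) =====
def Claim_equal_read_cost : Prop := ∀ (cost : String), Dom_read_cost cost → Spec_read_cost cost (read_cost cost)

-- ===== LEMMAS AND PROOFS =====

lemma count_go_single (c : Char) : ∀ (l : List Char) (fuel acc : Nat), l.length ≤ fuel →
    PySem.Chars.count.go [c] fuel l acc = acc + l.count c := by
  intro l
  induction l with
  | nil => intro fuel acc _; cases fuel <;> simp [PySem.Chars.count.go]
  | cons x t ih =>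
    intro fuel acc hle
    cases fuel with
    | zero => simp at hle
    | succ f =>
      simp only [List.length_cons, Nat.succ_le_succ_iff] at hle
      have step : PySem.Chars.count.go [c] (f+1) (x::t) acc =
          if c == x then PySem.Chars.count.go [c] f t (acc+1)
          else PySem.Chars.count.go [c] f t acc := by
        by_cases hx : c = x <;>
          simp [PySem.Chars.count.go, List.isPrefixOf, hx]
      rw [step]
      by_cases hx : c = x
      · subst hx
        rw [if_pos (by simp), ih f (acc+1) hle, List.count_cons_self]
        omega
      · rw [if_neg (by simp [hx]), ih f acc hle]
        simp [Ne.symm hx]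

lemma count_single (s : List Char) (c : Char) :
    PySem.Chars.count s [c] = s.count c := by
  simp [PySem.Chars.count, count_go_single c s s.length 0 le_rfl]

-- B's value as a function of the character counts
def readCostF (m : List Char) : List Char :=
  (List.replicate (m.count 'c') "○ ".toList).flatten ++
  (List.replicate (m.count 'h') "♡ ".toList).flatten ++
  (List.replicate (m.count 'm') "☾ ".toList).flatten ++
  (List.replicate (m.count 'n') "⚶ ".toList).flatten ++
  (List.replicate (m.count 's') "☆ ".toList).flatten ++
  (List.replicate (m.count 't') "࿐ ".toList).flatten

lemma count_zero_of_lt (t : List Char) (x k : Char) (h : ∀ y ∈ t, x ≤ y) (hk : k < x) :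
    t.count k = 0 := by
  rw [List.count_eq_zero]
  intro hmem
  exact absurd (h k hmem) (not_le.mpr hk)

lemma flatMap_sorted_eq_F (m : List Char) (hs : m.Pairwise (· ≤ ·)) :
    m.flatMap readCostSym = readCostF m := by
  induction m with
  | nil => simp [readCostF]
  | cons x t ih =>
    rw [List.pairwise_cons] at hs
    obtain ⟨hx, ht⟩ := hs
    have IH := ih ht
    rw [List.flatMap_cons, IH]
    have zc := count_zero_of_lt t x 'c' hx
    have zh := count_zero_of_lt t x 'h' hx
    have zm := count_zero_of_lt t x 'm' hx
    have zn := count_zero_of_lt t x 'n' hx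
    have zs := count_zero_of_lt t x 's' hx
    by_cases h1 : x = 'c'
    · subst h1
      simp [readCostF, readCostSym, List.replicate_succ]
    by_cases h2 : x = 'h'
    · subst h2
      simp [readCostF, readCostSym, List.replicate_succ,
        zc (by decide)]
    by_cases h3 : x = 'm'
    · subst h3
      simp [readCostF, readCostSym, List.replicate_succ,
        zc (by decide), zh (by decide)]
    by_cases h4 : x = 'n'
    · subst h4
      simp [readCostF, readCostSym, List.replicate_succ,
        zc (by decide), zh (by decide), zm (by decide)]
    by_cases h5 : x = 's'
    · subst h5
      simp [readCostF, readCostSym, List.replicate_succ,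
        zc (by decide), zh (by decide), zm (by decide), zn (by decide)]
    by_cases h6 : x = 't'
    · subst h6
      simp [readCostF, readCostSym, List.replicate_succ,
        zc (by decide), zh (by decide), zm (by decide), zn (by decide), zs (by decide)]
    · simp [readCostF, readCostSym, h1, h2, h3, h4, h5, h6]

-- ===== VERDICT (by name: the statement is the Claim_ definition above) =====
theorem read_cost_spec : Claim_equal_read_cost := by
  intro cost _
  unfold Spec_read_cost read_cost read_cost_alt
  simp only []
  rw [PySem.List.foldl_pyRange_zero_pyGetD (PySem.List.sorted cost.toList (fun c => c) false)
        ' ' (fun acc c => acc ++ readCostSym c) [],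
      PySem.List.foldl_append_eq_flatMap,
      flatMap_sorted_eq_F _ (PySem.List.sorted_pairwise _ _)]
  have hperm : (PySem.List.sorted cost.toList (fun c => c) false).Perm cost.toList :=
    PySem.List.sorted_perm _ _ _
  simp only [readCostTable, List.map_cons, List.map_nil, count_single, PySem.List.pyRepeat]
  congr 1
  simp [readCostF, PySem.Chars.join, List.intercalate, List.intersperse, hperm.count_eq]
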